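-- pv_equiv track=rewrite | github.com/jpsamuelson/aurora-icepower-booster | scripts/p7_full_strip.py | remove_balanced_blocks
-- ===== SOURCE A (Python) =====
-- def remove_balanced_blocks(text, keyword):
--     result = []
--     i = 0
--     removed = 0
--     kw = '(' + keyword
--     kw_len = len(kw)
--     while i < len(text):
--         if text[i:i+kw_len] == kw and (i+kw_len >= len(text) or text[i+kw_len] in ' \t\n('):
--             depth = 0
--             j = i
--             while j < len(text):
--                 if text[j] == '(':
--                     depth += 1
--                 elif text[j] == ')':
--                     depth -= 1
--                     if depth == 0:
--                         end = j + 1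
--                         while end < len(text) and text[end] in ' \t\n':
--                             end += 1
--                         removed += 1
--                         i = end
--                         break
--                 j += 1
--             else:
--                 result.append(text[i])
--                 i += 1
--         else:
--             result.append(text[i])
--             i += 1
--     return ''.join(result), removed
-- ===== SOURCE B (Python) =====
-- def remove_balanced_blocks(text, keyword):
--     # One pass precomputes the matching close-paren for every '(' with a stack,
--     # then the main scan skips each keyword block in O(1) instead of rescanning.
--     match = {}
--     stack = []
--     for idx, ch in enumerate(text):
--         if ch == '(':
--             stack.append(idx)
--         elif ch == ')' and stack:
--             match[stack.pop()] = idx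
--     n = len(text)
--     kw = '(' + keyword
--     k = len(kw)
--     out = []
--     removed = 0
--     i = 0
--     while i < n:
--         if (text.startswith(kw, i)
--                 and (i + k >= n or text[i + k] in ' \t\n(')
--                 and i in match):
--             j = match[i] + 1
--             while j < n and text[j] in ' \t\n':
--                 j += 1
--             i = j
--             removed += 1
--         else:
--             out.append(text[i])
--             i += 1
--     return ''.join(out), removed
-- ===== Notes on version B (the rewrite author's own statement) =====
-- stated objective: faster
-- what changed: B precomputes the matching close-paren index for every '(' in one stack pass, so each keyword block is skipped in O(1) instead of rescanning the text depth-counting from the keyword as A does.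
import Mathlib
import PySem

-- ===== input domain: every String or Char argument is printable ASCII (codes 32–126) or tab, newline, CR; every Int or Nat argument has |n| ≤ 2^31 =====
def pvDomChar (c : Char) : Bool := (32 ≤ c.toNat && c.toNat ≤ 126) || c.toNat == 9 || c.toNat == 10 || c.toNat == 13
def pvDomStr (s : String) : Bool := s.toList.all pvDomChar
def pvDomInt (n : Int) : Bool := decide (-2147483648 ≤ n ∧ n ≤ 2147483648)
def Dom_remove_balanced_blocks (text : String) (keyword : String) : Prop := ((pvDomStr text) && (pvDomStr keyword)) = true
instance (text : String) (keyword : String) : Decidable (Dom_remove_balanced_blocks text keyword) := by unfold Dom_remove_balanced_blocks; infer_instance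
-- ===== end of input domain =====

-- B replaces A's per-keyword depth-counting rescan by one stack pass that precomputes each
-- '('s matching ')', so a block is skipped via a dict lookup (objective: faster).
-- Both loops are written with a fuel argument (a standard totality device); the fuel chosen
-- is large enough that it never cuts a loop short (the loop index strictly increases).

-- shared character classes of A and B: ' \t\n' and ' \t\n('
def wsChar (c : Char) : Bool := c = ' ' || c = '\t' || c = '\n'
def wsOrOpen (c : Char) : Bool := wsChar c || c = '('

-- ===== PORT A =====
-- A's inner 'while j < len(text)' depth loop: position where depth first returns to 0 at a ')'
def fcA (cs : List Char) : Nat → Nat → Int → Option Nat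
  | 0, _, _ => none
  | fuel+1, j, depth =>
    if h : j < cs.length then
      if cs[j] = '(' then fcA cs fuel (j+1) (depth+1)
      else if cs[j] = ')' then
        if depth - 1 = 0 then some j else fcA cs fuel (j+1) (depth-1)
      else fcA cs fuel (j+1) depth
    else none

-- 'while end < len(text) and text[end] in " \t\n": end += 1'
def skipWs (cs : List Char) : Nat → Nat → Nat
  | 0, e => e
  | fuel+1, e =>
    if h : e < cs.length then
      if wsChar cs[e] then skipWs cs fuel (e+1) else e
    else e

-- A's outer while loop, literal: slice test, next-char test, then the depth rescan from i
def loopA (cs kw : List Char) : Nat → Nat → List Char → Int → List Char × Int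
  | 0, _, acc, removed => (acc, removed)
  | fuel+1, i, acc, removed =>
    if h : i < cs.length then
      if PySem.List.slice cs (some (i : Int)) (some ((i + kw.length : Nat) : Int)) = kw
         ∧ (cs.length ≤ i + kw.length ∨ wsOrOpen (cs.getD (i + kw.length) ' ') = true) then
        match fcA cs cs.length i 0 with
        | some j => loopA cs kw fuel (skipWs cs cs.length (j+1)) acc (removed + 1)
        | none => loopA cs kw fuel (i+1) (acc ++ [cs[i]]) removed
      else loopA cs kw fuel (i+1) (acc ++ [cs[i]]) removed
    else (acc, removed)

def remove_balanced_blocks (text : String) (keyword : String) : String × Int :=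
  let cs := text.toList
  let kw := '(' :: keyword.toList
  let r := loopA cs kw (cs.length + 1) 0 [] 0
  (String.ofList r.1, r.2)

-- ===== PORT B =====
-- one step of B's enumerate pass: push '(' indices, pop on ')' into the match dict
def mstep (st : List Int × PySem.Dict Int Int) (p : Int × Char) : List Int × PySem.Dict Int Int :=
  if p.2 = '(' then (p.1 :: st.1, st.2)
  else if p.2 = ')' then
    match st.1 with
    | [] => st
    | t :: rest => (rest, st.2.insert t p.1)
  else st

-- B's "for idx, ch in enumerate(text)" stack pass building the matching-paren dict
def buildMatch (cs : List Char) : PySem.Dict Int Int :=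
  ((PySem.List.enumerate cs 0).foldl mstep ([], PySem.Dict.empty)).2

-- B's main scan: same walk, but the block end is a dict lookup instead of a rescan
def loopB (cs kw : List Char) (d : PySem.Dict Int Int) : Nat → Nat → List Char → Int → List Char × Int
  | 0, _, acc, removed => (acc, removed)
  | fuel+1, i, acc, removed =>
    if h : i < cs.length then
      if kw.isPrefixOf (cs.drop i)
         ∧ (cs.length ≤ i + kw.length ∨ wsOrOpen (cs.getD (i + kw.length) ' ') = true) then
        match d.get? (i : Int) with
        | some j => loopB cs kw d fuel (skipWs cs cs.length (j.toNat + 1)) acc (removed + 1)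
        | none => loopB cs kw d fuel (i+1) (acc ++ [cs[i]]) removed
      else loopB cs kw d fuel (i+1) (acc ++ [cs[i]]) removed
    else (acc, removed)

def remove_balanced_blocks_alt (text : String) (keyword : String) : String × Int :=
  let cs := text.toList
  let d := buildMatch cs
  let kw := '(' :: keyword.toList
  let r := loopB cs kw d (cs.length + 1) 0 [] 0
  (String.ofList r.1, r.2)

-- ===== PRECONDITION & SPEC =====
def Spec_remove_balanced_blocks (text : String) (keyword : String) (out : String × Int) : Prop := out = remove_balanced_blocks_alt text keyword
instance (text : String) (keyword : String) (out : String × Int) : Decidable (Spec_remove_balanced_blocks text keyword out) := by unfold Spec_remove_balanced_blocks; infer_instance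

-- ===== CLAIM (what is proved, stated in full; the proofs are below) =====
def Claim_equal_remove_balanced_blocks : Prop := ∀ (text : String) (keyword : String), Dom_remove_balanced_blocks text keyword → Spec_remove_balanced_blocks text keyword (remove_balanced_blocks text keyword)

-- ===== LEMMAS AND PROOFS =====

lemma fcA_none (cs : List Char) (fuel j : Nat) (d : Int) (h : cs.length ≤ j) :
    fcA cs fuel j d = none := by
  cases fuel with
  | zero => rfl
  | succ f => rw [fcA, dif_neg (by omega)]

lemma fcA_fuel (cs : List Char) : ∀ (f1 f2 j : Nat) (d : Int),
    cs.length - j ≤ f1 → cs.length - j ≤ f2 → fcA cs f1 j d = fcA cs f2 j d := by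
  intro f1
  induction f1 with
  | zero =>
      intro f2 j d h1 h2
      rw [fcA_none cs 0 j d (by omega), fcA_none cs f2 j d (by omega)]
  | succ f ih =>
      intro f2 j d h1 h2
      by_cases hj : j < cs.length
      · obtain ⟨g, rfl⟩ : ∃ g, f2 = g + 1 := ⟨f2 - 1, by omega⟩
        rw [fcA, fcA, dif_pos hj, dif_pos hj]
        have hrec := fun d' => ih g (j+1) d' (by omega) (by omega)
        split_ifs <;> first | rfl | exact hrec _
      · rw [fcA_none cs (f+1) j d (by omega), fcA_none cs f2 j d (by omega)]

lemma fcA_bound (cs : List Char) : ∀ (fuel j : Nat) (d : Int) (j' : Nat),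
    fcA cs fuel j d = some j' → j ≤ j' ∧ j' < cs.length ∧ cs[j']? = some ')' := by
  intro fuel
  induction fuel with
  | zero => intro j d j' h; simp [fcA] at h
  | succ f ih =>
      intro j d j' h
      rw [fcA] at h
      by_cases hj : j < cs.length
      · rw [dif_pos hj] at h
        by_cases hc : cs[j] = '('
        · rw [if_pos hc] at h
          have := ih (j+1) _ _ h; exact ⟨by omega, this.2.1, this.2.2⟩
        · rw [if_neg hc] at h
          by_cases hc2 : cs[j] = ')'
          · rw [if_pos hc2] at h
            by_cases hd : d - 1 = 0
            · rw [if_pos hd] at h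
              cases h
              exact ⟨le_rfl, hj, by rw [List.getElem?_eq_getElem hj, hc2]⟩
            · rw [if_neg hd] at h
              have := ih (j+1) _ _ h; exact ⟨by omega, this.2.1, this.2.2⟩
          · rw [if_neg hc2] at h
            have := ih (j+1) _ _ h; exact ⟨by omega, this.2.1, this.2.2⟩
      · rw [dif_neg hj] at h; cases h

lemma fcA_step (cs : List Char) (m : Nat) (hm : m < cs.length) (d : Int) :
    fcA cs cs.length m d = if cs[m] = '(' then fcA cs cs.length (m+1) (d+1)
      else if cs[m] = ')' then (if d - 1 = 0 then some m else fcA cs cs.length (m+1) (d-1))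
      else fcA cs cs.length (m+1) d := by
  obtain ⟨g, hg⟩ : ∃ g, cs.length = g + 1 := ⟨cs.length - 1, by omega⟩
  conv_lhs => rw [hg, fcA, dif_pos hm]
  have hrec : ∀ d', fcA cs g (m+1) d' = fcA cs cs.length (m+1) d' :=
    fun d' => fcA_fuel cs g cs.length (m+1) d' (by omega) (by omega)
  split_ifs <;> first | rfl | exact hrec _
def MInv (cs : List Char) (m : Nat) (st : List Int) (d : PySem.Dict Int Int) : Prop :=
  (∀ t (ht : t < st.length), ∃ q : Nat, st[t] = (q : Int) ∧ q < m ∧ cs[q]? = some '(' ∧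
      fcA cs cs.length q 0 = fcA cs cs.length m ((t : Int) + 1))
  ∧ (∀ (p : Nat) (j : Int), d.get? (p : Int) = some j ↔
      (cs[p]? = some '(' ∧ ∃ jn : Nat, j = (jn : Int) ∧ fcA cs cs.length p 0 = some jn ∧ jn < m))
  ∧ (∀ p : Nat, p < m → cs[p]? = some '(' → ((p : Int) ∈ st ∨ (d.get? (p : Int)).isSome))

-- if fcA of some '(' position closes exactly at the current ')', that position is the stack head
lemma match_at_head (cs : List Char) (m : Nat) (hm : m < cs.length) (st : List Int)
    (d : PySem.Dict Int Int) (h : MInv cs m st d) (hc2 : cs[m] = ')') (p : Nat)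
    (hp : cs[p]? = some '(') (hf : fcA cs cs.length p 0 = some m) :
    ∃ rest, st = (p : Int) :: rest := by
  obtain ⟨h1, h2, h3⟩ := h
  have hb := fcA_bound cs cs.length p 0 m hf
  have hpm : p < m := by
    rcases Nat.lt_or_ge p m with h' | h'
    · exact h'
    · exfalso
      have : p = m := by omega
      subst this
      rw [List.getElem?_eq_getElem hm, hc2] at hp
      simp at hp
  rcases h3 p hpm hp with hin | hsome
  · obtain ⟨t, ht, hel⟩ := List.mem_iff_getElem.mp hin
    obtain ⟨q, hq1, hq2, hq3, hq4⟩ := h1 t ht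
    have hqp : q = p := by have := hq1.symm.trans hel; exact_mod_cast this
    subst hqp
    rw [hf, fcA_step cs m hm] at hq4
    rw [if_neg (by rw [hc2]; decide), if_pos hc2] at hq4
    by_cases ht0 : t = 0
    · subst ht0
      have hne : st ≠ [] := by intro hnil; rw [hnil] at ht; simp at ht
      obtain ⟨a, rest, rfl⟩ := List.exists_cons_of_ne_nil hne
      simp at hel
      exact ⟨rest, by rw [hel]⟩
    · exfalso
      rw [if_neg (by push_cast; omega)] at hq4
      have := fcA_bound cs cs.length (m+1) _ m hq4.symm
      omega
  · exfalso
    rw [Option.isSome_iff_exists] at hsome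
    obtain ⟨j, hj⟩ := hsome
    obtain ⟨_, jn, rfl, hf2, hlt⟩ := (h2 p j).mp hj
    rw [hf] at hf2
    cases hf2
    omega

lemma mstep_close_nil (d : PySem.Dict Int Int) (i : Int) : mstep ([], d) (i, ')') = ([], d) := by
  simp [mstep]

lemma mstep_close_cons (x : Int) (rest : List Int) (d : PySem.Dict Int Int) (i : Int) :
    mstep (x :: rest, d) (i, ')') = (rest, d.insert x i) := by
  simp [mstep]

lemma mstep_other (s : List Int × PySem.Dict Int Int) (i : Int) (c : Char)
    (hc : ¬c = '(') (hc2 : ¬c = ')') : mstep s (i, c) = s := by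
  simp [mstep, hc, hc2]

lemma MInv_step (cs : List Char) (m : Nat) (hm : m < cs.length) (st : List Int)
    (d : PySem.Dict Int Int) (h : MInv cs m st d) :
    MInv cs (m+1) (mstep (st, d) ((m : Int), cs[m])).1 (mstep (st, d) ((m : Int), cs[m])).2 := by
  have hfb : ∀ (p jn : Nat), cs[p]? = some '(' → fcA cs cs.length p 0 = some jn → jn < m → jn < m + 1 := by
    intro p jn _ _ h'; omega
  obtain ⟨h1, h2, h3⟩ := h
  by_cases hc : cs[m] = '('
  · -- push m
    simp only [mstep, hc, if_pos]
    refine ⟨?_, ?_, ?_⟩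
    · intro t ht
      match t with
      | 0 =>
          refine ⟨m, by simp, by omega, by rw [List.getElem?_eq_getElem hm, hc], ?_⟩
          rw [fcA_step cs m hm 0, if_pos hc]
          norm_num
      | Nat.succ t' =>
          simp only [List.length_cons] at ht
          obtain ⟨q, hq1, hq2, hq3, hq4⟩ := h1 t' (by omega)
          refine ⟨q, by simpa using hq1, by omega, hq3, ?_⟩
          rw [hq4, fcA_step cs m hm, if_pos hc]
          push_cast
          ring_nf
    · intro p j
      rw [h2 p j]
      constructor
      · rintro ⟨hp, jn, rfl, hf, hlt⟩; exact ⟨hp, jn, rfl, hf, by omega⟩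
      · rintro ⟨hp, jn, rfl, hf, hlt⟩
        refine ⟨hp, jn, rfl, hf, ?_⟩
        rcases Nat.lt_succ_iff_lt_or_eq.mp hlt with h' | rfl
        · exact h'
        · exfalso
          have := (fcA_bound cs cs.length p 0 jn hf).2.2
          rw [List.getElem?_eq_getElem hm, hc] at this
          simp at this
    · intro p hp hop
      rcases Nat.lt_succ_iff_lt_or_eq.mp hp with h' | rfl
      · rcases h3 p h' hop with hin | hsome
        · exact Or.inl (List.mem_cons_of_mem _ hin)
        · exact Or.inr hsome
      · exact Or.inl (List.mem_cons_self ..)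
  · by_cases hc2 : cs[m] = ')'
    · cases hst : st with
      | nil =>
          subst hst
          rw [hc2, mstep_close_nil]
          refine ⟨by simp, ?_, ?_⟩
          · intro p j
            rw [h2 p j]
            constructor
            · rintro ⟨hp, jn, rfl, hf, hlt⟩; exact ⟨hp, jn, rfl, hf, by omega⟩
            · rintro ⟨hp, jn, rfl, hf, hlt⟩
              refine ⟨hp, jn, rfl, hf, ?_⟩
              rcases Nat.lt_succ_iff_lt_or_eq.mp hlt with h' | heq
              · exact h'
              · exfalso
                rw [heq] at hf
                obtain ⟨rest, hrest⟩ := match_at_head cs m hm [] d ⟨h1, h2, h3⟩ hc2 p hp hf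
                simp at hrest
          · intro p hp hop
            rcases Nat.lt_succ_iff_lt_or_eq.mp hp with h' | rfl
            · exact h3 p h' hop
            · exfalso
              rw [List.getElem?_eq_getElem hm, hc2] at hop
              simp at hop
      | cons x rest =>
          subst hst
          rw [hc2, mstep_close_cons]
          obtain ⟨q0, hx, hq02, hq03, hq04⟩ := h1 0 (by simp)
          simp at hx
          have hq0f : fcA cs cs.length q0 0 = some m := by
            rw [hq04, fcA_step cs m hm]
            rw [if_neg (by rw [hc2]; decide), if_pos hc2]
            norm_num
          refine ⟨?_, ?_, ?_⟩
          · intro t ht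
            simp at ht
            obtain ⟨q, hq1, hq2, hq3, hq4⟩ := h1 (t+1) (by simp; omega)
            refine ⟨q, by simpa using hq1, by omega, hq3, ?_⟩
            rw [hq4, fcA_step cs m hm]
            rw [if_neg (by rw [hc2]; decide), if_pos hc2]
            rw [if_neg (by push_cast; omega)]
            push_cast
            ring_nf
          · intro p j
            rw [PySem.Dict.get?_insert, hx]
            by_cases hpq : p = q0
            · subst hpq
              rw [if_pos rfl]
              constructor
              · rintro h'
                cases h'
                exact ⟨hq03, m, rfl, hq0f, by omega⟩
              · rintro ⟨hp, jn, rfl, hf, hlt⟩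
                rw [hq0f] at hf
                cases hf
                rfl
            · rw [if_neg (by exact_mod_cast hpq)]
              rw [h2 p j]
              constructor
              · rintro ⟨hp, jn, rfl, hf, hlt⟩; exact ⟨hp, jn, rfl, hf, by omega⟩
              · rintro ⟨hp, jn, rfl, hf, hlt⟩
                refine ⟨hp, jn, rfl, hf, ?_⟩
                rcases Nat.lt_succ_iff_lt_or_eq.mp hlt with h' | heq
                · exact h'
                · exfalso
                  rw [heq] at hf
                  obtain ⟨rest', hrest⟩ := match_at_head cs m hm (x :: rest) d ⟨h1, h2, h3⟩ hc2 p hp hf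
                  rw [hx] at hrest
                  simp at hrest
                  exact hpq (by exact_mod_cast hrest.1.symm)
          · intro p hp hop
            rcases Nat.lt_succ_iff_lt_or_eq.mp hp with h' | rfl
            · rcases h3 p h' hop with hin | hsome
              · rcases List.mem_cons.mp hin with h'' | h''
                · right
                  rw [h'']
                  simp [PySem.Dict.get?_insert_self]
                · exact Or.inl h''
              · right
                rw [PySem.Dict.get?_insert]
                split
                · simp
                · exact hsome
            · exfalso
              rw [List.getElem?_eq_getElem hm, hc2] at hop
              simp at hop
    · -- other char
      rw [mstep_other (st, d) _ _ hc hc2]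
      refine ⟨?_, ?_, ?_⟩
      · intro t ht
        obtain ⟨q, hq1, hq2, hq3, hq4⟩ := h1 t ht
        refine ⟨q, hq1, by omega, hq3, ?_⟩
        rw [hq4, fcA_step cs m hm, if_neg hc, if_neg hc2]
      · intro p j
        rw [h2 p j]
        constructor
        · rintro ⟨hp, jn, rfl, hf, hlt⟩; exact ⟨hp, jn, rfl, hf, by omega⟩
        · rintro ⟨hp, jn, rfl, hf, hlt⟩
          refine ⟨hp, jn, rfl, hf, ?_⟩
          rcases Nat.lt_succ_iff_lt_or_eq.mp hlt with h' | rfl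
          · exact h'
          · exfalso
            have := (fcA_bound cs cs.length p 0 jn hf).2.2
            rw [List.getElem?_eq_getElem hm] at this
            simp at this
            exact hc2 this
      · intro p hp hop
        rcases Nat.lt_succ_iff_lt_or_eq.mp hp with h' | rfl
        · exact h3 p h' hop
        · exfalso
          rw [List.getElem?_eq_getElem hm] at hop
          simp at hop
          exact hc hop

lemma MInv_fold (cs : List Char) : ∀ (l : List Char) (m : Nat) (st : List Int)
    (d : PySem.Dict Int Int), cs.drop m = l → MInv cs m st d →
    MInv cs (m + l.length) ((PySem.List.enumerate l (m : Int)).foldl mstep (st, d)).1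
      ((PySem.List.enumerate l (m : Int)).foldl mstep (st, d)).2 := by
  intro l
  induction l with
  | nil => intro m st d _ h; simpa using h
  | cons c l ih =>
      intro m st d hdrop h
      have hm : m < cs.length := by
        by_contra hge
        rw [List.drop_eq_nil_of_le (by omega)] at hdrop
        simp at hdrop
      have hcm : cs[m] = c := by
        have h' : cs[m]? = some c := by
          rw [← List.head?_drop, hdrop]; rfl
        rw [List.getElem?_eq_getElem hm] at h'
        exact Option.some.inj h'
      have hdrop' : cs.drop (m+1) = l := by
        have : cs.drop (m+1) = (cs.drop m).drop 1 := by
          rw [List.drop_drop]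
        rw [this, hdrop]; rfl
      have hstep := MInv_step cs m hm st d h
      rw [hcm] at hstep
      rw [PySem.List.enumerate_cons, List.foldl_cons, List.length_cons,
          show (m : Int) + 1 = ((m + 1 : Nat) : Int) by push_cast; ring,
          show m + (l.length + 1) = (m + 1) + l.length by omega]
      exact ih (m+1) _ _ hdrop' hstep

lemma buildMatch_get (cs : List Char) (i : Nat) (hi : cs[i]? = some '(') :
    (buildMatch cs).get? (i : Int) = (fcA cs cs.length i 0).map (fun j => ((j : Nat) : Int)) := by
  have h0 : MInv cs 0 [] PySem.Dict.empty := by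
    refine ⟨by simp, ?_, fun p hp _ => absurd hp (Nat.not_lt_zero p)⟩
    intro p j
    simp only [PySem.Dict.get?_empty]
    constructor
    · intro h'; cases h'
    · rintro ⟨_, jn, rfl, _, hlt⟩; omega
  have h := MInv_fold cs cs 0 [] PySem.Dict.empty (by simp) h0
  simp only [Nat.cast_zero, Nat.zero_add] at h
  obtain ⟨h1, h2, h3⟩ := h
  cases hfc : fcA cs cs.length i 0 with
  | some j =>
      exact (h2 i (j : Int)).mpr ⟨hi, j, rfl, hfc, (fcA_bound cs cs.length i 0 j hfc).2.1⟩
  | none =>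
      cases hg : (buildMatch cs).get? (i : Int) with
      | none => rfl
      | some j =>
          exfalso
          have := (h2 i j).mp (by rw [← hg]; rfl)
          obtain ⟨_, jn, rfl, hf2, _⟩ := this
          rw [hfc] at hf2
          cases hf2

lemma cond_iff (cs kw : List Char) (i : Nat) :
    (PySem.List.slice cs (some (i : Int)) (some ((i + kw.length : Nat) : Int)) = kw)
      ↔ kw.isPrefixOf (cs.drop i) := by
  rw [PySem.List.slice_natCast, Nat.add_sub_cancel_left, List.isPrefixOf_iff_prefix,
      List.prefix_iff_eq_take]
  exact eq_comm

lemma loopAB (cs kwt : List Char) : ∀ (fuel i : Nat) (acc : List Char) (r : Int),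
    loopA cs ('(' :: kwt) fuel i acc r = loopB cs ('(' :: kwt) (buildMatch cs) fuel i acc r := by
  intro fuel
  induction fuel with
  | zero => intro i acc r; rfl
  | succ f ih =>
      intro i acc r
      rw [loopA, loopB]
      by_cases h : i < cs.length
      · simp only [dif_pos h]
        by_cases hcnd : PySem.List.slice cs (some (i : Int)) (some ((i + ('(' :: kwt).length : Nat) : Int)) = '(' :: kwt
           ∧ (cs.length ≤ i + ('(' :: kwt).length ∨ wsOrOpen (cs.getD (i + ('(' :: kwt).length) ' ') = true)
        · have hpre : ('(' :: kwt).isPrefixOf (cs.drop i) := (cond_iff cs _ i).mp hcnd.1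
          rw [if_pos hcnd, if_pos ⟨hpre, hcnd.2⟩]
          have hopen : cs[i]? = some '(' := by
            obtain ⟨t, ht⟩ := List.isPrefixOf_iff_prefix.mp hpre
            rw [← List.head?_drop, ← ht]
            rfl
          have hbm := buildMatch_get cs i hopen
          cases hfc : fcA cs cs.length i 0 with
          | some j =>
              rw [hfc] at hbm
              simp only [Option.map_some] at hbm
              rw [hbm]
              simpa using ih (skipWs cs cs.length (j+1)) acc (r+1)
          | none =>
              rw [hfc] at hbm
              simp only [Option.map_none] at hbm
              rw [hbm]
              exact ih (i+1) (acc ++ [cs[i]]) r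
        · rw [if_neg hcnd, if_neg (by rw [← cond_iff cs _ i]; exact hcnd)]
          exact ih (i+1) (acc ++ [cs[i]]) r
      · simp only [dif_neg h]

-- ===== VERDICT (by name: the statement is the Claim_ definition above) =====
theorem remove_balanced_blocks_spec : Claim_equal_remove_balanced_blocks := by
  intro text keyword _
  show (String.ofList (loopA text.toList ('(' :: keyword.toList) (text.toList.length + 1) 0 [] 0).1,
        (loopA text.toList ('(' :: keyword.toList) (text.toList.length + 1) 0 [] 0).2)
      = (String.ofList (loopB text.toList ('(' :: keyword.toList) (buildMatch text.toList) (text.toList.length + 1) 0 [] 0).1,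
         (loopB text.toList ('(' :: keyword.toList) (buildMatch text.toList) (text.toList.length + 1) 0 [] 0).2)
  rw [loopAB text.toList keyword.toList (text.toList.length + 1) 0 [] 0]
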